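-- pv_equiv track=rewrite | github.com/daniel159357/DATA-SCIENCE-FOUNDATIONS-Hurricane-Analysis | script.py | most_affected_areas
-- ===== SOURCE A (Python) =====
-- def most_affected_areas(count_affected_areas):
--   most_affected = {}
--   count = 0
--   for k, v in count_affected_areas.items():
--     if v > count:
--       most_affected[k] = v
--       count = v
--   return most_affected
-- ===== SOURCE B (Python) =====
-- def most_affected_areas(count_affected_areas):
--     items = list(count_affected_areas.items())
--     return {k: v
--             for i, (k, v) in enumerate(items)
--             if v > 0 and all(v > u for _, u in items[:i])}
-- ===== Notes on version B (the rewrite author's own statement) =====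
-- stated objective: alternative
-- what changed: Replaces the stateful running-maximum accumulator with a stateless per-item dominance test: an item is kept iff its value is positive and strictly exceeds every earlier value, expressed as a single dict comprehension over enumerate with a slice.
import Mathlib
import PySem

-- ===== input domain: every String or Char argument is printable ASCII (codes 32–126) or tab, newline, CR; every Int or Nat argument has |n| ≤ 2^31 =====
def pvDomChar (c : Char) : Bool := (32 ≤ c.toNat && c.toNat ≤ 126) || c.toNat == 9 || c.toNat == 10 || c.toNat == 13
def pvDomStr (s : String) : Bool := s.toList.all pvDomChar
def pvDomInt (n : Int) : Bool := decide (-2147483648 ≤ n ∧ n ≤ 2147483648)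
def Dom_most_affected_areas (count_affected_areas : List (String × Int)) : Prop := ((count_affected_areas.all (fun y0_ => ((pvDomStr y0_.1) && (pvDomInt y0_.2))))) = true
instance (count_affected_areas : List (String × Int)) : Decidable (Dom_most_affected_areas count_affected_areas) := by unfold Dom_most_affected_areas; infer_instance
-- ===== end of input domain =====

-- B replaces A's running-maximum accumulator by a stateless per-item dominance test
-- (keep v iff v > 0 and v exceeds every earlier value); an alternative decomposition, not faster.

-- ===== PORT A =====
-- A: fold over items with state (result dict, running count), keep v when v > count.
def most_affected_areas (count_affected_areas : List (String × Int)) : List (String × Int) :=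
  (count_affected_areas.foldl
    (fun (s : PySem.Dict String Int × Int) kv =>
      if kv.2 > s.2 then (s.1.insert kv.1 kv.2, kv.2) else s)
    (PySem.Dict.empty, 0)).1.items

-- ===== PORT B =====
-- B: dict comprehension over enumerate(items); keep (k,v) iff v > 0 and all(v > u for _,u in items[:i]).
def most_affected_areas_alt (count_affected_areas : List (String × Int)) : List (String × Int) :=
  ((PySem.List.enumerate count_affected_areas).foldl
    (fun (d : PySem.Dict String Int) ikv =>
      if ikv.2.2 > 0 ∧ (PySem.List.slice count_affected_areas (some 0) (some ikv.1)).all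
            (fun p => decide (ikv.2.2 > p.2)) = true
      then d.insert ikv.2.1 ikv.2.2 else d)
    PySem.Dict.empty).items

-- ===== PRECONDITION & SPEC =====
def Spec_most_affected_areas (count_affected_areas : List (String × Int)) (out : List (String × Int)) : Prop := out = most_affected_areas_alt count_affected_areas
instance (count_affected_areas : List (String × Int)) (out : List (String × Int)) : Decidable (Spec_most_affected_areas count_affected_areas out) := by unfold Spec_most_affected_areas; infer_instance

-- ===== CLAIM (what is proved, stated in full; the proofs are below) =====
def Claim_equal_most_affected_areas : Prop := ∀ (count_affected_areas : List (String × Int)), Dom_most_affected_areas count_affected_areas → Spec_most_affected_areas count_affected_areas (most_affected_areas count_affected_areas)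

-- ===== LEMMAS AND PROOFS =====

-- A's running count after a prefix `pre` equals this fold (it is the max of 0 and the prefix values).
def pvCount (pre : List (String × Int)) : Int :=
  pre.foldl (fun c p => if p.2 > c then p.2 else c) 0

-- v exceeds the running max of a list (seeded with a) iff it exceeds the seed and every element.
theorem pvCount_lt_iff (l : List (String × Int)) (a v : Int) :
    (l.foldl (fun c p => if p.2 > c then p.2 else c) a < v) ↔ (a < v ∧ ∀ p ∈ l, p.2 < v) := by
  induction l generalizing a with
  | nil => simp
  | cons hd tl ih =>
      simp only [List.foldl_cons, ih, List.mem_cons]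
      constructor
      · rintro ⟨h1, h2⟩
        split_ifs at h1 with h
        · exact ⟨by omega, fun p hp => by rcases hp with rfl | hp; omega; exact h2 p hp⟩
        · exact ⟨h1, fun p hp => by rcases hp with rfl | hp; omega; exact h2 p hp⟩
      · rintro ⟨h1, h2⟩
        refine ⟨?_, fun p hp => h2 p (Or.inr hp)⟩
        have := h2 hd (Or.inl rfl)
        split_ifs <;> omega

theorem pvCount_append_singleton (pre : List (String × Int)) (kv : String × Int) :
    pvCount (pre ++ [kv]) = if kv.2 > pvCount pre then kv.2 else pvCount pre := by
  simp [pvCount, List.foldl_append]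

-- Main invariant: A's fold continued from (d, pvCount pre) equals B's fold over the
-- enumerated remainder, where the full list is pre ++ rest.
theorem pv_main (rest : List (String × Int)) :
    ∀ (pre : List (String × Int)) (d : PySem.Dict String Int),
    (rest.foldl
      (fun (s : PySem.Dict String Int × Int) kv =>
        if kv.2 > s.2 then (s.1.insert kv.1 kv.2, kv.2) else s)
      (d, pvCount pre)).1
    = (PySem.List.enumerate rest (pre.length : Int)).foldl
        (fun (d : PySem.Dict String Int) ikv =>
          if ikv.2.2 > 0 ∧ (PySem.List.slice (pre ++ rest) (some 0) (some ikv.1)).all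
                (fun p => decide (ikv.2.2 > p.2)) = true
          then d.insert ikv.2.1 ikv.2.2 else d)
        d := by
  induction rest with
  | nil => intro pre d; simp [PySem.List.enumerate]
  | cons kv tl ih =>
      intro pre d
      rw [PySem.List.enumerate_cons, List.foldl_cons, List.foldl_cons]
      have hslice : PySem.List.slice (pre ++ kv :: tl) (some 0) (some (pre.length : Int))
          = pre := by
        rw [PySem.List.slice_zero_start, PySem.List.slice_to_natCast]
        exact List.take_left
      have hcond : (kv.2 > pvCount pre) ↔
          (kv.2 > 0 ∧ (PySem.List.slice (pre ++ kv :: tl) (some 0) (some (pre.length : Int))).all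
            (fun p => decide (kv.2 > p.2)) = true) := by
        rw [hslice]
        have := pvCount_lt_iff pre 0 kv.2
        simp only [gt_iff_lt, List.all_eq_true, decide_eq_true_eq]
        exact this.trans (by tauto)
      have hpre : pre ++ kv :: tl = (pre ++ [kv]) ++ tl := by simp
      by_cases h : kv.2 > pvCount pre
      · rw [if_pos h, if_pos (hcond.mp h)]
        have hc : pvCount (pre ++ [kv]) = kv.2 := by
          rw [pvCount_append_singleton, if_pos h]
        have h2 := ih (pre ++ [kv]) (d.insert kv.1 kv.2)
        rw [hc, ← hpre] at h2
        simpa using h2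
      · rw [if_neg h, if_neg (fun hc2 => h (hcond.mpr hc2))]
        have hc : pvCount (pre ++ [kv]) = pvCount pre := by
          rw [pvCount_append_singleton, if_neg h]
        have h2 := ih (pre ++ [kv]) d
        rw [hc, ← hpre] at h2
        simpa using h2

-- ===== VERDICT (by name: the statement is the Claim_ definition above) =====
theorem most_affected_areas_spec : Claim_equal_most_affected_areas := by
  intro xs _
  unfold Spec_most_affected_areas most_affected_areas most_affected_areas_alt
  have := pv_main xs [] PySem.Dict.empty
  simp only [pvCount, List.foldl_nil, List.length_nil, Nat.cast_zero, List.nil_append] at this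
  rw [this]
  rfl
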